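-- pv_equiv track=rewrite | github.com/Victoralin10/CDFTool | submit.py | extract_contest_letter
-- ===== SOURCE A (Python) =====
-- def extract_contest_letter(filename):
--     nm, lt = "", ""
--     for c in filename:
--         if c == '.':
--             break
--         if c in "0123456789":
--             nm += c
--         else:
--             lt += c
--
--     return nm, lt
-- ===== SOURCE B (Python) =====
-- def extract_contest_letter(filename):
--     dot = filename.find('.')
--     if dot == -1:
--         dot = len(filename)
--     nm, lt = "", ""
--     i = dot - 1
--     while i >= 0:
--         c = filename[i]
--         if '0' <= c <= '9':
--             nm = c + nm
--         else:
--             lt = c + lt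
--         i -= 1
--     return nm, lt
-- ===== Notes on version B (the rewrite author's own statement) =====
-- stated objective: alternative
-- what changed: Instead of A's forward for-loop that appends characters until it hits the dot, B first locates the dot boundary with str.find, then walks the prefix backwards by index in a while loop, prepending each character to the digit or non-digit accumulator (range test '0'<=c<='9' instead of membership in the digit string).
import Mathlib
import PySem

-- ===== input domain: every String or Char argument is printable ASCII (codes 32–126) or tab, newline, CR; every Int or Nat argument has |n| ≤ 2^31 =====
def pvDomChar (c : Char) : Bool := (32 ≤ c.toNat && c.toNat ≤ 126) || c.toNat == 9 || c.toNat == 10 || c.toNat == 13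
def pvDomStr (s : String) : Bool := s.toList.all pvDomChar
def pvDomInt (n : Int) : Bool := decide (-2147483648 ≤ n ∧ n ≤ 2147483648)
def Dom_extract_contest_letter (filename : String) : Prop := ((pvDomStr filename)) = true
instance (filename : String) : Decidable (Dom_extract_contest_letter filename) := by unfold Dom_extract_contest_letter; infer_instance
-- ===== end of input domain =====

-- B locates the first '.' with str.find and then walks the prefix BACKWARDS by index,
-- prepending each character to the matching accumulator (objective: alternative decomposition).

-- ===== PORT A =====
-- A's for-loop with break, as structural recursion over the remaining characters,
-- carrying the two string accumulators nm and lt.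
def extractLoopA : List Char → String → String → String × String
  | [], nm, lt => (nm, lt)
  | c :: cs, nm, lt =>
    if c = '.' then (nm, lt)
    else if ("0123456789".toList.contains c) then extractLoopA cs (nm.push c) lt
    else extractLoopA cs nm (lt.push c)

def extract_contest_letter (filename : String) : String × String :=
  extractLoopA filename.toList "" ""

-- ===== PORT B =====
-- Source B's `while i >= 0` loop, counting i down from dot-1; recursion on i+1 (0 = loop exit).
-- filename[i] is always in range here (0 ≤ i < dot ≤ len), so getD is exact.
def extractLoopB (chars : List Char) : Nat → String → String → String × String
  | 0, nm, lt => (nm, lt)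
  | i + 1, nm, lt =>
    let c := chars.getD i ' '
    if '0' ≤ c ∧ c ≤ '9' then extractLoopB chars i (String.singleton c ++ nm) lt
    else extractLoopB chars i nm (String.singleton c ++ lt)

def extract_contest_letter_alt (filename : String) : String × String :=
  let dot : Int := PySem.Str.find filename "."
  let dotN : Nat := (if dot = -1 then (PySem.Str.len filename : Int) else dot).toNat
  extractLoopB filename.toList dotN "" ""

-- ===== PRECONDITION & SPEC =====
def Spec_extract_contest_letter (filename : String) (out : String × String) : Prop := out = extract_contest_letter_alt filename
instance (filename : String) (out : String × String) : Decidable (Spec_extract_contest_letter filename out) := by unfold Spec_extract_contest_letter; infer_instance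

-- ===== CLAIM (what is proved, stated in full; the proofs are below) =====
def Claim_equal_extract_contest_letter : Prop := ∀ (filename : String), Dom_extract_contest_letter filename → Spec_extract_contest_letter filename (extract_contest_letter filename)

-- ===== LEMMAS AND PROOFS =====

-- membership in "0123456789" is exactly the code-point range '0'..'9'
theorem digit_mem (c : Char) : ("0123456789".toList.contains c) = decide ('0' ≤ c ∧ c ≤ '9') := by
  have h : "0123456789".toList = ['0','1','2','3','4','5','6','7','8','9'] := by decide
  have hval : ∀ d : Char, (c == d) = decide (c.toNat = d.toNat) := by
    intro d
    by_cases hh : c = d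
    · subst hh; simp
    · have hne : c.toNat ≠ d.toNat := fun hc => hh (Char.ext (UInt32.toNat_inj.mp hc))
      simp [hh, hne]
  rw [h]
  simp only [List.contains_cons, List.contains_nil, Bool.or_false, hval]
  rw [Bool.eq_iff_iff]
  simp only [Bool.or_eq_true, decide_eq_true_eq]
  rw [Char.le_def, Char.le_def, UInt32.le_iff_toNat_le, UInt32.le_iff_toNat_le]
  show _ ↔ (('0':Char).toNat ≤ c.toNat ∧ c.toNat ≤ ('9':Char).toNat)
  simp only [show ('0':Char).toNat = 48 from rfl, show ('1':Char).toNat = 49 from rfl,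
    show ('2':Char).toNat = 50 from rfl, show ('3':Char).toNat = 51 from rfl,
    show ('4':Char).toNat = 52 from rfl, show ('5':Char).toNat = 53 from rfl,
    show ('6':Char).toNat = 54 from rfl, show ('7':Char).toNat = 55 from rfl,
    show ('8':Char).toNat = 56 from rfl, show ('9':Char).toNat = 57 from rfl]
  omega

-- A's break-loop appends the digit/non-digit filtering of the pre-dot prefix.
theorem extractLoopA_eq (cs : List Char) : ∀ (nm lt : String),
    extractLoopA cs nm lt =
      (nm ++ String.ofList ((cs.takeWhile (fun c => c ≠ '.')).filter
          (fun c => decide ('0' ≤ c ∧ c ≤ '9'))),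
       lt ++ String.ofList ((cs.takeWhile (fun c => c ≠ '.')).filter
          (fun c => !decide ('0' ≤ c ∧ c ≤ '9')))) := by
  induction cs with
  | nil =>
    intro nm lt
    simp only [extractLoopA, List.takeWhile_nil, List.filter_nil]
    refine Prod.ext ?_ ?_ <;> (apply String.toList_injective; simp)
  | cons c cs ih =>
    intro nm lt
    by_cases hdot : c = '.'
    · simp only [extractLoopA, if_pos hdot, List.takeWhile_cons, hdot]
      refine Prod.ext ?_ ?_ <;> (apply String.toList_injective; simp)
    · by_cases hd : '0' ≤ c ∧ c ≤ '9'
      · simp only [extractLoopA, if_neg hdot, digit_mem c, decide_eq_true hd, if_true, ih,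
          List.takeWhile_cons, hdot, List.filter_cons]
        refine Prod.ext ?_ ?_ <;>
          (apply String.toList_injective; simp [hdot, hd])
      · simp only [extractLoopA, if_neg hdot, digit_mem c, decide_eq_false hd,
          Bool.false_eq_true, if_false, ih, List.takeWhile_cons, hdot, List.filter_cons]
        refine Prod.ext ?_ ?_ <;>
          (apply String.toList_injective;
           rcases not_and_or.mp hd with h | h <;> simp [List.filter_cons, hdot, h])

-- B's backward loop prepends the filtering of the first n characters.
theorem extractLoopB_eq (chars : List Char) : ∀ (n : Nat), n ≤ chars.length → ∀ (nm lt : String),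
    extractLoopB chars n nm lt =
      (String.ofList ((chars.take n).filter (fun c => decide ('0' ≤ c ∧ c ≤ '9'))) ++ nm,
       String.ofList ((chars.take n).filter (fun c => !decide ('0' ≤ c ∧ c ≤ '9'))) ++ lt) := by
  intro n
  induction n with
  | zero =>
    intro _ nm lt
    simp only [extractLoopB, List.take_zero, List.filter_nil]
    refine Prod.ext ?_ ?_ <;> (apply String.toList_injective; simp)
  | succ n ih =>
    intro hn nm lt
    have hlt : n < chars.length := by omega
    have hget : chars.getD n ' ' = chars[n]'hlt := by
      simp [List.getD, List.getElem?_eq_getElem hlt]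
    have htake : chars.take (n + 1) = chars.take n ++ [chars[n]'hlt] := by
      rw [List.take_succ, List.getElem?_eq_getElem hlt]; rfl
    by_cases hd : '0' ≤ chars[n]'hlt ∧ chars[n]'hlt ≤ '9'
    · simp only [extractLoopB, hget, if_pos hd, ih (by omega), htake, List.filter_append]
      refine Prod.ext ?_ ?_ <;>
        (apply String.toList_injective; simp [List.filter_cons, hd])
    · simp only [extractLoopB, hget, if_neg hd, ih (by omega), htake, List.filter_append]
      refine Prod.ext ?_ ?_ <;>
        (apply String.toList_injective;
         rcases not_and_or.mp hd with h | h <;> simp [List.filter_cons, h])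

-- takeWhile as take up to a boundary index
theorem takeWhile_eq_take {α} (p : α → Bool) (l : List α) (n : Nat) (hn : n ≤ l.length)
    (h1 : ∀ i, (hi : i < n) → p (l[i]'(by omega)) = true)
    (h2 : n = l.length ∨ ∃ h : n < l.length, p (l[n]'h) = false) :
    l.takeWhile p = l.take n := by
  induction l generalizing n with
  | nil =>
    have : n = 0 := by simpa using hn
    subst this; rfl
  | cons a l ih =>
    cases n with
    | zero =>
      rcases h2 with h2 | ⟨_, h2⟩
      · simp at h2
      · simp only [List.takeWhile_cons]
        simp only [List.getElem_cons_zero] at h2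
        simp [h2]
    | succ n =>
      have ha : p a = true := by simpa using h1 0 (Nat.succ_pos n)
      simp only [List.takeWhile_cons, ha, if_true, List.take_succ_cons]
      congr 1
      refine ih n (by simpa using hn) (fun i hi => ?_) ?_
      · simpa using h1 (i + 1) (by omega)
      · rcases h2 with h2 | ⟨h, h2⟩
        · left; simpa using h2
        · right; exact ⟨by simpa using h, by simpa using h2⟩

-- the pre-dot prefix is the take of B's dot index
theorem takeWhile_dot (s : List Char) :
    s.takeWhile (fun c => c ≠ '.') =
      s.take ((if PySem.Chars.find s ['.'] = -1 then (s.length : Int) else PySem.Chars.find s ['.']).toNat) := by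
  have hpre : ∀ (l : List Char), ['.'] <+: l ↔ l.head? = some '.' := by
    intro l; cases l <;> simp [List.cons_prefix_iff]
  by_cases hf : PySem.Chars.find s ['.'] = -1
  · rw [if_pos hf, Int.toNat_natCast, List.take_length]
    apply List.takeWhile_eq_self_iff.mpr
    intro a ha
    have hni : ¬ ['.'] <:+: s := (PySem.Chars.find_eq_neg_one_iff s ['.']).mp hf
    simp only [decide_eq_true_eq]
    intro hdot
    subst hdot
    obtain ⟨i, hi, hgi⟩ := List.getElem_of_mem ha
    exact hni (List.infix_iff_prefix_suffix.mpr
      ⟨_, (hpre _).mpr ((List.head?_drop).trans (List.getElem?_eq_some_iff.mpr ⟨hi, hgi⟩)),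
        List.drop_suffix i s⟩)
  · rw [if_neg hf]
    have hpos : 0 ≤ PySem.Chars.find s ['.'] := by
      have := PySem.Chars.neg_one_le_find s ['.']
      omega
    obtain ⟨hp, hmin⟩ := PySem.Chars.find_spec (s := s) (sub := ['.']) hpos
    set k := (PySem.Chars.find s ['.']).toNat with hk
    have h := (hpre _).mp hp
    rw [List.head?_drop] at h
    have hkl : k < s.length := (List.getElem?_eq_some_iff.mp h).1
    have hkc : s[k]'hkl = '.' := by
      have := (List.getElem?_eq_some_iff.mp h).2
      simpa using this
    refine takeWhile_eq_take _ s k (by omega) (fun i hi => ?_) (Or.inr ⟨hkl, by simp [hkc]⟩)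
    have hni := hmin i hi
    rw [hpre, List.head?_drop] at hni
    have hne : s[i]'(by omega) ≠ '.' := by
      intro hx; exact hni (List.getElem?_eq_some_iff.mpr ⟨by omega, hx⟩)
    simpa using hne

-- ===== VERDICT (by name: the statement is the Claim_ definition above) =====
theorem extract_contest_letter_spec : Claim_equal_extract_contest_letter := by
  intro filename _
  unfold Spec_extract_contest_letter
  show extract_contest_letter filename = _
  rw [extract_contest_letter, extractLoopA_eq, extract_contest_letter_alt]
  simp only [PySem.Str.find_eq, PySem.Str.len_eq, show (".").toList = ['.'] from rfl]
  have hle : ((if PySem.Chars.find filename.toList ['.'] = -1 then (filename.toList.length : Int)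
      else PySem.Chars.find filename.toList ['.']).toNat) ≤ filename.toList.length := by
    split
    · simp
    · have := PySem.Chars.find_le_length (s := filename.toList) (sub := ['.'])
      omega
  rw [extractLoopB_eq _ _ hle, takeWhile_dot]
  refine Prod.ext ?_ ?_ <;> (apply String.toList_injective; simp)
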